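-- pv_equiv track=rewrite | github.com/jxlee007/WRITE | story-wiki/scripts/apply_sync.py | rebuild_content
-- ===== SOURCE A (Python) =====
-- def rebuild_content(sections: dict) -> str:
--     output   = []
--     ordering = ["Synopsis", "Characters", "Themes", "Techniques", "Worlds", "Sources"]
--     written  = set()
--
--     output.append(sections.get("_frontmatter", ""))
--     output.append(sections.get("_h1", ""))
--     output.append(sections.get("_meta", ""))
--
--     for heading in ordering:
--         if heading in sections:
--             output.append(f"## {heading}\n")
--             output.append(sections[heading])
--             written.add(heading)
--
--     for heading, body in sections.items():
--         if heading.startswith("_") or heading in written: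
--             continue
--         output.append(f"## {heading}\n")
--         output.append(body)
--
--     return "".join(output)
-- ===== SOURCE B (Python) =====
-- def rebuild_content(sections: dict) -> str:
--     ordering = ["Synopsis", "Characters", "Themes", "Techniques", "Worlds", "Sources"]
--     rank = {h: i for i, h in enumerate(ordering)}
--     head = (sections.get("_frontmatter", "")
--             + sections.get("_h1", "")
--             + sections.get("_meta", ""))
--     buckets = [[] for _ in range(len(ordering) + 1)]
--     for heading, body in sections.items():
--         if not heading.startswith("_"):
--             buckets[rank.get(heading, len(ordering))].append(f"## {heading}\n{body}")
--     return head + "".join(chunk for bucket in buckets for chunk in bucket)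
-- ===== Notes on version B (the rewrite author's own statement) =====
-- stated objective: alternative
-- what changed: Replaces A's two passes (a scan of the priority ordering with membership lookups plus a second scan guarded by a 'written' set) with a single bucket pass: each non-underscore section is appended as one chunk to the bucket of its priority rank (rank = index in the ordering, last bucket for unknowns), and the buckets are concatenated.
import Mathlib
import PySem

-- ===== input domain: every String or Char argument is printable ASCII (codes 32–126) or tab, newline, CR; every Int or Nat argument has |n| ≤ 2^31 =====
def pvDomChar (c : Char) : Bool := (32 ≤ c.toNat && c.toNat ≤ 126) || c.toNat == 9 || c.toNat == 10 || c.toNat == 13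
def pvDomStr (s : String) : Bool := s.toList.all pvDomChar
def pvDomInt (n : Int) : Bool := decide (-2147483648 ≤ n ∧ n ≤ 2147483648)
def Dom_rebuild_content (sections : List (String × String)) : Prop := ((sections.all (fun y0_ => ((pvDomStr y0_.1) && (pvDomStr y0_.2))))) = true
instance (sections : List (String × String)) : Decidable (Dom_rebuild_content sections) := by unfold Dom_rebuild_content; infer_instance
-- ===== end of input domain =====

-- B replaces A's two passes (priority scan plus a 'written'-set-guarded second scan) with a
-- single bucket pass over the sections, concatenating the rank buckets at the end (alternative
-- decomposition, same cost).

-- ===== PORT A =====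
def rebuild_content (sections : List (String × String)) : String :=
  let d : PySem.Dict String String := PySem.Dict.mk sections
  let ordering : List String := ["Synopsis", "Characters", "Themes", "Techniques", "Worlds", "Sources"]
  let output : List String :=
    [PySem.Dict.getD d "_frontmatter" "", PySem.Dict.getD d "_h1" "", PySem.Dict.getD d "_meta" ""]
  -- first loop: 'sections[heading]' is guarded by 'heading in sections', so getD "" is exact there
  let st := ordering.foldl (fun (acc : List String × PySem.Set String) heading =>
      if PySem.Dict.contains d heading then
        (acc.1 ++ ["## " ++ heading ++ "\n", PySem.Dict.getD d heading ""], PySem.Set.add acc.2 heading)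
      else acc) (output, PySem.Set.empty)
  let output := sections.foldl (fun (out : List String) hb =>
      if PySem.Str.startswith hb.1 "_" || PySem.Set.contains st.2 hb.1 then out
      else out ++ ["## " ++ hb.1 ++ "\n", hb.2]) st.1
  PySem.Str.join "" output

-- ===== PORT B =====
def rebuild_content_alt (sections : List (String × String)) : String :=
  let ordering : List String := ["Synopsis", "Characters", "Themes", "Techniques", "Worlds", "Sources"]
  let rank : PySem.Dict String Int :=
    (PySem.List.enumerate ordering).foldl (fun d p => PySem.Dict.insert d p.2 p.1) PySem.Dict.empty
  let d : PySem.Dict String String := PySem.Dict.mk sections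
  let head := PySem.Dict.getD d "_frontmatter" "" ++ PySem.Dict.getD d "_h1" ""
                ++ PySem.Dict.getD d "_meta" ""
  let buckets : List (List String) := List.replicate (ordering.length + 1) []
  let buckets := sections.foldl (fun (bs : List (List String)) hb =>
      if !PySem.Str.startswith hb.1 "_" then
        let i : Int := PySem.Dict.getD rank hb.1 (ordering.length : Int)
        PySem.List.pySetD bs i (PySem.List.pyGetD bs i [] ++ ["## " ++ hb.1 ++ "\n" ++ hb.2])
      else bs) buckets
  head ++ PySem.Str.join "" buckets.flatten

-- ===== PRECONDITION & SPEC =====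
-- The Python argument is a dict, whose keys are necessarily distinct; Pre_ excludes only the
-- association lists with a duplicated key, which no dict argument can produce.
def Pre_rebuild_content (sections : List (String × String)) : Prop :=
  (sections.map Prod.fst).Nodup
instance (sections : List (String × String)) : Decidable (Pre_rebuild_content sections) := by
  unfold Pre_rebuild_content; infer_instance

def pvWitness_rebuild_content : (List (String × String)) :=
  [("_h1", "# T\n"), ("Extra", "e1\n"), ("Synopsis", "s1\n")]

def Spec_rebuild_content (sections : List (String × String)) (out : String) : Prop := out = rebuild_content_alt sections
instance (sections : List (String × String)) (out : String) : Decidable (Spec_rebuild_content sections out) := by unfold Spec_rebuild_content; infer_instance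

-- ===== CLAIM (what is proved, stated in full; the proofs are below) =====
def Claim_equal_rebuild_content : Prop := ∀ (sections : List (String × String)), Dom_rebuild_content sections → Pre_rebuild_content sections → Spec_rebuild_content sections (rebuild_content sections)

-- ===== LEMMAS AND PROOFS =====

def pvOrd : List String := ["Synopsis", "Characters", "Themes", "Techniques", "Worlds", "Sources"]
-- the rank that B's literal dict assigns to a heading
def pvRank (h : String) : Nat :=
  if h = "Synopsis" then 0 else if h = "Characters" then 1 else if h = "Themes" then 2
  else if h = "Techniques" then 3 else if h = "Worlds" then 4 else if h = "Sources" then 5 else 6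

lemma pvJoinChars_cons (x : List Char) (xs : List (List Char)) :
    PySem.Chars.join [] (x :: xs) = x ++ PySem.Chars.join [] xs := by
  cases xs with
  | nil => simp [PySem.Chars.join_singleton, PySem.Chars.join_nil]
  | cons b t => simp [PySem.Chars.join_cons_cons]

lemma pvJoin_nil : PySem.Str.join "" [] = "" := by
  apply String.toList_injective
  simp [PySem.Str.toList_join, PySem.Chars.join_nil]

lemma pvJoin_cons (x : String) (xs : List String) :
    PySem.Str.join "" (x :: xs) = x ++ PySem.Str.join "" xs := by
  apply String.toList_injective
  simp [PySem.Str.toList_join, pvJoinChars_cons]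

lemma pvJoin_append (xs ys : List String) :
    PySem.Str.join "" (xs ++ ys) = PySem.Str.join "" xs ++ PySem.Str.join "" ys := by
  induction xs with
  | nil => simp [pvJoin_nil, String.empty_append]
  | cons a t ih => simp [pvJoin_cons, ih, String.append_assoc]

lemma pvJoin_flatMap {α : Type} (l : List α) (g : α → List String) :
    PySem.Str.join "" (l.flatMap g) = PySem.Str.join "" (l.map fun x => PySem.Str.join "" (g x)) := by
  induction l with
  | nil => simp
  | cons a t ih => simp [pvJoin_append, pvJoin_cons, ih]

lemma pvJoin_filter_map {α : Type} (l : List α) (p : α → Bool) (f : α → String) :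
    PySem.Str.join "" ((l.filter p).map f)
      = PySem.Str.join "" (l.map fun x => if p x then f x else "") := by
  induction l with
  | nil => simp
  | cons a t ih =>
    by_cases hp : p a <;> simp [hp, pvJoin_cons, ih, String.empty_append]

set_option maxHeartbeats 1000000 in
lemma pv_rank_getD (h : String) :
    PySem.Dict.getD ((PySem.List.enumerate
          (["Synopsis", "Characters", "Themes", "Techniques", "Worlds", "Sources"] : List String)).foldl
        (fun d p => PySem.Dict.insert d p.2 p.1) PySem.Dict.empty) h
        ((["Synopsis", "Characters", "Themes", "Techniques", "Worlds", "Sources"] : List String).length : Int)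
      = ((pvRank h : Nat) : Int) := by
  have hr : (PySem.List.enumerate
          (["Synopsis", "Characters", "Themes", "Techniques", "Worlds", "Sources"] : List String)).foldl
        (fun d p => PySem.Dict.insert d p.2 p.1) PySem.Dict.empty
      = (((((((PySem.Dict.empty : PySem.Dict String Int).insert "Synopsis" 0).insert
          "Characters" 1).insert "Themes" 2).insert "Techniques" 3).insert
          "Worlds" 4).insert "Sources" 5) := by rfl
  rw [hr]
  simp only [PySem.Dict.getD_insert, PySem.Dict.getD_empty, pvRank, List.length_cons,
    List.length_nil]
  split_ifs <;> simp_all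

lemma pv_rank_lt (h : String) : pvRank h < 7 := by
  unfold pvRank; split_ifs <;> omega

lemma pv_rank_eq_six_iff (h : String) : pvRank h = 6 ↔ h ∉ pvOrd := by
  simp only [pvOrd, List.mem_cons, List.not_mem_nil, or_false]
  unfold pvRank; split_ifs <;> simp_all

lemma pv_rank_inj (h k : String) (hk : k ∈ pvOrd) (he : pvRank h = pvRank k) : h = k := by
  have h0 : pvRank "Synopsis" = 0 := by decide
  have h1 : pvRank "Characters" = 1 := by decide
  have h2 : pvRank "Themes" = 2 := by decide
  have h3 : pvRank "Techniques" = 3 := by decide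
  have h4 : pvRank "Worlds" = 4 := by decide
  have h5 : pvRank "Sources" = 5 := by decide
  simp only [pvOrd, List.mem_cons, List.not_mem_nil, or_false] at hk
  rcases hk with rfl | rfl | rfl | rfl | rfl | rfl <;>
    simp only [h0, h1, h2, h3, h4, h5] at he <;> revert he <;>
    unfold pvRank <;> split_ifs <;> intro he <;> first | assumption | exact he.elim | omega

lemma pv_ord_not_underscore (h : String) (hh : h ∈ pvOrd) :
    PySem.Str.startswith h "_" = false := by
  fin_cases hh <;> decide

lemma pv_filter_key (sections : List (String × String)) (k : String)
    (hnd : (sections.map Prod.fst).Nodup) :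
    sections.filter (fun hb => hb.1 == k)
      = match PySem.Dict.get? (PySem.Dict.mk sections) k with
        | none => [] | some v => [(k, v)] := by
  induction sections with
  | nil => rfl
  | cons p t ih =>
    obtain ⟨p1, p2⟩ := p
    simp only [List.map_cons, List.nodup_cons] at hnd
    by_cases hpk : p1 = k
    · subst hpk
      have hfil : t.filter (fun hb => hb.1 == p1) = [] := by
        rw [List.filter_eq_nil_iff]
        intro hb hmem hbeq
        exact hnd.1 ((by simpa using hbeq) ▸ List.mem_map_of_mem hmem)
      simp [PySem.Dict.get?_mk_cons, hfil]
    · have ht := ih hnd.2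
      simp only [List.filter_cons, PySem.Dict.get?_mk_cons]
      have hbk : ((p1, p2).1 == k) = false := by simpa using hpk
      simp only [hbk]
      simpa using ht

lemma pv_contains_of_mem (sections : List (String × String)) (hb : String × String)
    (hmem : hb ∈ sections) : PySem.Dict.contains (PySem.Dict.mk sections) hb.1 = true := by
  rw [PySem.Dict.contains_iff_mem_keys]
  simp only [PySem.Dict.keys]
  exact List.mem_map_of_mem hmem

-- A's first loop (over the priority ordering), characterised
lemma pv_loop1 (d : PySem.Dict String String) (ord : List String)
    (out0 : List String) (s0 : PySem.Set String) :
    ord.foldl (fun (acc : List String × PySem.Set String) heading =>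
        if PySem.Dict.contains d heading then
          (acc.1 ++ ["## " ++ heading ++ "\n", PySem.Dict.getD d heading ""],
           PySem.Set.add acc.2 heading)
        else acc) (out0, s0)
    = (out0 ++ ord.flatMap (fun h =>
          if PySem.Dict.contains d h then ["## " ++ h ++ "\n", PySem.Dict.getD d h ""] else []),
       ord.foldl (fun s h => if PySem.Dict.contains d h then PySem.Set.add s h else s) s0) := by
  induction ord generalizing out0 s0 with
  | nil => simp
  | cons a t ih => by_cases hc : PySem.Dict.contains d a <;> simp [hc, ih]

-- A's second loop, characterised
lemma pv_loop2 (c : String × String → Bool) (l : List (String × String)) (out0 : List String) :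
    l.foldl (fun out hb => if c hb then out else out ++ ["## " ++ hb.1 ++ "\n", hb.2]) out0
    = out0 ++ l.flatMap (fun hb => if c hb then [] else ["## " ++ hb.1 ++ "\n", hb.2]) := by
  induction l generalizing out0 with
  | nil => simp
  | cons a t ih => by_cases hc : c a <;> simp [hc, ih]

-- A's 'written' set is the present priority headings, in priority order
lemma pv_written (d : PySem.Dict String String) :
    (["Synopsis", "Characters", "Themes", "Techniques", "Worlds", "Sources"] : List String).foldl
        (fun s h => if PySem.Dict.contains d h then PySem.Set.add s h else s) PySem.Set.empty
      = (["Synopsis", "Characters", "Themes", "Techniques", "Worlds", "Sources"] : List String).filter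
          (fun h => PySem.Dict.contains d h) := by
  rw [PySem.List.foldl_if_eq_foldl_filter]
  have he : (PySem.Set.empty : PySem.Set String) = ([] : List String) := rfl
  rw [he, ← PySem.Set.ofList_eq_foldl]
  have hnodup : ((["Synopsis", "Characters", "Themes", "Techniques", "Worlds", "Sources"] :
      List String).filter (fun h => PySem.Dict.contains d h)).Nodup :=
    List.Nodup.filter _ (by decide)
  exact PySem.Set.ofList_eq_self_of_nodup _ hnodup

-- B's bucket loop, in canonical form after pv_rank_getD / pySetD_natCast / pyGetD_natCast
lemma pv_fold_buckets_len (l : List (String × String)) (bs : List (List String)) :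
    (l.foldl (fun (bs : List (List String)) hb =>
        if !PySem.Str.startswith hb.1 "_" then
          bs.set (pvRank hb.1) (bs.getD (pvRank hb.1) [] ++ ["## " ++ hb.1 ++ "\n" ++ hb.2])
        else bs) bs).length = bs.length := by
  induction l generalizing bs with
  | nil => rfl
  | cons hb t ih =>
    rw [List.foldl_cons, ih]
    by_cases hs : PySem.Str.startswith hb.1 "_"
    · rw [if_neg (by simp only [hs, Bool.not_true]; exact Bool.false_ne_true)]
    · rw [Bool.not_eq_true] at hs
      rw [if_pos (by simp only [hs, Bool.not_false])]
      exact List.length_set ..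

lemma pv_fold_buckets (l : List (String × String)) (bs : List (List String))
    (h7 : bs.length = 7) (i : Nat) (hi : i < 7) :
    (l.foldl (fun (bs : List (List String)) hb =>
        if !PySem.Str.startswith hb.1 "_" then
          bs.set (pvRank hb.1) (bs.getD (pvRank hb.1) [] ++ ["## " ++ hb.1 ++ "\n" ++ hb.2])
        else bs) bs)[i]?
    = some (bs.getD i [] ++ (l.filter (fun hb =>
          !PySem.Str.startswith hb.1 "_" && pvRank hb.1 == i)).map
            (fun hb => "## " ++ hb.1 ++ "\n" ++ hb.2)) := by
  induction l generalizing bs with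
  | nil =>
    have hlt : i < bs.length := by omega
    simp [List.getD_eq_getElem?_getD, List.getElem?_eq_getElem hlt]
  | cons hb t ih =>
    rw [List.foldl_cons, List.filter_cons]
    by_cases hs : PySem.Str.startswith hb.1 "_"
    · rw [if_neg (by simp only [hs, Bool.not_true]; exact Bool.false_ne_true),
        if_neg (by simp only [hs, Bool.not_true, Bool.false_and]; exact Bool.false_ne_true)]
      exact ih bs h7
    · rw [Bool.not_eq_true] at hs
      have hrlt : pvRank hb.1 < bs.length := by rw [h7]; exact pv_rank_lt _
      by_cases hi2 : pvRank hb.1 = i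
      · subst hi2
        rw [if_pos (by simp only [hs, Bool.not_false]),
          if_pos (by simp only [hs, Bool.not_false, Bool.true_and, beq_self_eq_true]),
          ih _ (by rw [List.length_set]; exact h7)]
        simp [List.getD_eq_getElem?_getD, hrlt, List.append_assoc]
      · rw [if_pos (by simp only [hs, Bool.not_false]),
          if_neg (by simp only [hs, Bool.not_false, Bool.true_and, beq_iff_eq]; exact hi2),
          ih _ (by rw [List.length_set]; exact h7)]
        simp [List.getD_eq_getElem?_getD, hi2]

-- the bucket of each present priority heading joins to A's conditional pair
lemma pv_piece (sections : List (String × String)) (hnd : (sections.map Prod.fst).Nodup)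
    (k : String) (i : Nat) (hk : k ∈ pvOrd) (hik : pvRank k = i) :
    PySem.Str.join "" ((sections.filter (fun hb =>
        !PySem.Str.startswith hb.1 "_" && pvRank hb.1 == i)).map
          (fun hb => "## " ++ hb.1 ++ "\n" ++ hb.2))
    = PySem.Str.join "" (if PySem.Dict.contains (PySem.Dict.mk sections) k then
        ["## " ++ k ++ "\n", PySem.Dict.getD (PySem.Dict.mk sections) k ""] else []) := by
  have hpred : (fun hb : String × String =>
      !PySem.Str.startswith hb.1 "_" && pvRank hb.1 == i) = (fun hb => hb.1 == k) := by
    funext hb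
    by_cases hbk : hb.1 = k
    · rw [hbk, pv_ord_not_underscore k hk, hik]
      simp only [Bool.not_false, Bool.true_and, beq_self_eq_true]
    · have hne : ¬(pvRank hb.1 = i) := fun he => hbk (pv_rank_inj _ _ hk (he.trans hik.symm))
      have h1 : (pvRank hb.1 == i) = false := beq_eq_false_iff_ne.mpr hne
      have h2 : (hb.1 == k) = false := beq_eq_false_iff_ne.mpr hbk
      rw [h1, h2, Bool.and_false]
  rw [hpred, pv_filter_key sections k hnd, PySem.Dict.contains_eq_isSome_get?]
  cases hg : PySem.Dict.get? (PySem.Dict.mk sections) k with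
  | none => simp
  | some v =>
    simp [PySem.Dict.getD_eq_get?_getD, hg, pvJoin_cons, pvJoin_nil,
      String.append_empty, String.append_assoc]

-- the overflow bucket joins to A's second loop
lemma pv_last (sections : List (String × String)) :
    PySem.Str.join "" (sections.flatMap (fun hb =>
        if PySem.Str.startswith hb.1 "_"
            || PySem.Set.contains ((["Synopsis", "Characters", "Themes", "Techniques",
                  "Worlds", "Sources"] : List String).filter
                (fun h => PySem.Dict.contains (PySem.Dict.mk sections) h)) hb.1 then []
        else ["## " ++ hb.1 ++ "\n", hb.2]))
    = PySem.Str.join "" ((sections.filter (fun hb =>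
        !PySem.Str.startswith hb.1 "_" && pvRank hb.1 == 6)).map
          (fun hb => "## " ++ hb.1 ++ "\n" ++ hb.2)) := by
  rw [pvJoin_flatMap, pvJoin_filter_map]
  apply congrArg
  apply List.map_congr_left
  intro hb hmem
  have hc := pv_contains_of_mem sections hb hmem
  by_cases hs : PySem.Str.startswith hb.1 "_"
  · rw [if_pos (by rw [hs, Bool.true_or]),
      if_neg (by rw [hs, Bool.not_true, Bool.false_and]; exact Bool.false_ne_true),
      pvJoin_nil]
  · rw [Bool.not_eq_true] at hs
    by_cases hm : hb.1 ∈ pvOrd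
    · have hm' : hb.1 ∈ (["Synopsis", "Characters", "Themes", "Techniques",
          "Worlds", "Sources"] : List String) := by simpa [pvOrd] using hm
      have h6 : (pvRank hb.1 == 6) = false :=
        beq_eq_false_iff_ne.mpr (fun he => ((pv_rank_eq_six_iff hb.1).mp he) hm)
      have hmemW : hb.1 ∈ (["Synopsis", "Characters", "Themes", "Techniques",
          "Worlds", "Sources"] : List String).filter
            (fun h => PySem.Dict.contains (PySem.Dict.mk sections) h) :=
        List.mem_filter.mpr ⟨hm', hc⟩
      have hwt : PySem.Set.contains ((["Synopsis", "Characters", "Themes", "Techniques",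
          "Worlds", "Sources"] : List String).filter
            (fun h => PySem.Dict.contains (PySem.Dict.mk sections) h)) hb.1 = true := by
        simp only [PySem.Set.contains_eq_listContains]
        simp
        exact ⟨by simpa using hm', hb.2, by simpa using hmem⟩
      rw [if_pos (by rw [hs, hwt, Bool.false_or]),
        if_neg (by rw [h6, Bool.and_false]; exact Bool.false_ne_true),
        pvJoin_nil]
    · have h6 : pvRank hb.1 = 6 := (pv_rank_eq_six_iff hb.1).mpr hm
      have hnotmem : hb.1 ∉ (["Synopsis", "Characters", "Themes", "Techniques",
          "Worlds", "Sources"] : List String).filter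
            (fun h => PySem.Dict.contains (PySem.Dict.mk sections) h) := fun hx =>
        hm (by simpa [pvOrd] using (List.mem_filter.mp hx).1)
      have hwf : PySem.Set.contains ((["Synopsis", "Characters", "Themes", "Techniques",
          "Worlds", "Sources"] : List String).filter
            (fun h => PySem.Dict.contains (PySem.Dict.mk sections) h)) hb.1 = false := by
        simp only [PySem.Set.contains_eq_listContains]
        simp
        intro hdisj
        exact absurd (show hb.1 ∈ pvOrd by
          simp only [pvOrd, List.mem_cons, List.not_mem_nil, or_false]
          exact hdisj) hm
      rw [if_neg (by rw [hs, hwf]; exact Bool.false_ne_true),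
        if_pos (by rw [hs, h6]; rfl),
        pvJoin_cons, pvJoin_cons, pvJoin_nil]
      simp [String.append_assoc]

-- ===== VERDICT (by name: the statement is the Claim_ definition above) =====
theorem rebuild_content_spec : Claim_equal_rebuild_content := by
  intro sections _ hpre
  have hnd : (sections.map Prod.fst).Nodup := hpre
  unfold Spec_rebuild_content rebuild_content rebuild_content_alt
  simp only [pv_rank_getD, PySem.List.pySetD_natCast, PySem.List.pyGetD_natCast]
  rw [pv_loop1]
  dsimp only
  rw [pv_written, pv_loop2]
  have h7rep : (List.replicate ((["Synopsis", "Characters", "Themes", "Techniques", "Worlds",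
      "Sources"] : List String).length + 1) ([] : List String)).length = 7 := rfl
  have hfb : ∀ i : Nat, i < 7 →
      (sections.foldl (fun (bs : List (List String)) hb =>
          if !PySem.Str.startswith hb.1 "_" then
            bs.set (pvRank hb.1) (bs.getD (pvRank hb.1) [] ++ ["## " ++ hb.1 ++ "\n" ++ hb.2])
          else bs) (List.replicate ((["Synopsis", "Characters", "Themes", "Techniques", "Worlds",
            "Sources"] : List String).length + 1) []))[i]?
      = some ((sections.filter (fun hb =>
            !PySem.Str.startswith hb.1 "_" && pvRank hb.1 == i)).map
              (fun hb => "## " ++ hb.1 ++ "\n" ++ hb.2)) := by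
    intro i hi
    rw [pv_fold_buckets sections _ h7rep i hi]
    simp [List.getD_eq_getElem?_getD, hi]
    try (interval_cases i <;> rfl)
  have hlen : (sections.foldl (fun (bs : List (List String)) hb =>
          if !PySem.Str.startswith hb.1 "_" then
            bs.set (pvRank hb.1) (bs.getD (pvRank hb.1) [] ++ ["## " ++ hb.1 ++ "\n" ++ hb.2])
          else bs) (List.replicate ((["Synopsis", "Characters", "Themes", "Techniques", "Worlds",
            "Sources"] : List String).length + 1) [])).length = 7 := by
    rw [pv_fold_buckets_len]; exact h7rep
  have hBk : (sections.foldl (fun (bs : List (List String)) hb =>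
          if !PySem.Str.startswith hb.1 "_" then
            bs.set (pvRank hb.1) (bs.getD (pvRank hb.1) [] ++ ["## " ++ hb.1 ++ "\n" ++ hb.2])
          else bs) (List.replicate ((["Synopsis", "Characters", "Themes", "Techniques", "Worlds",
            "Sources"] : List String).length + 1) []))
      = [((sections.filter (fun hb =>
            !PySem.Str.startswith hb.1 "_" && pvRank hb.1 == 0)).map
              (fun hb => "## " ++ hb.1 ++ "\n" ++ hb.2)),
         ((sections.filter (fun hb =>
            !PySem.Str.startswith hb.1 "_" && pvRank hb.1 == 1)).map
              (fun hb => "## " ++ hb.1 ++ "\n" ++ hb.2)),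
         ((sections.filter (fun hb =>
            !PySem.Str.startswith hb.1 "_" && pvRank hb.1 == 2)).map
              (fun hb => "## " ++ hb.1 ++ "\n" ++ hb.2)),
         ((sections.filter (fun hb =>
            !PySem.Str.startswith hb.1 "_" && pvRank hb.1 == 3)).map
              (fun hb => "## " ++ hb.1 ++ "\n" ++ hb.2)),
         ((sections.filter (fun hb =>
            !PySem.Str.startswith hb.1 "_" && pvRank hb.1 == 4)).map
              (fun hb => "## " ++ hb.1 ++ "\n" ++ hb.2)),
         ((sections.filter (fun hb =>
            !PySem.Str.startswith hb.1 "_" && pvRank hb.1 == 5)).map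
              (fun hb => "## " ++ hb.1 ++ "\n" ++ hb.2)),
         ((sections.filter (fun hb =>
            !PySem.Str.startswith hb.1 "_" && pvRank hb.1 == 6)).map
              (fun hb => "## " ++ hb.1 ++ "\n" ++ hb.2))] := by
    apply List.ext_getElem?
    intro i
    by_cases hi : i < 7
    · interval_cases i <;> (rw [hfb _ (by omega)]; rfl)
    · rw [List.getElem?_eq_none (by rw [hlen]; omega),
        List.getElem?_eq_none (by simp; omega)]
  rw [hBk]
  simp only [List.flatten_cons, List.flatten_nil, List.flatMap_cons, List.flatMap_nil,
    List.cons_append, List.nil_append, List.append_nil,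
    pvJoin_append, pvJoin_cons]
  rw [pv_piece sections hnd "Synopsis" 0 (by decide) (by decide),
    pv_piece sections hnd "Characters" 1 (by decide) (by decide),
    pv_piece sections hnd "Themes" 2 (by decide) (by decide),
    pv_piece sections hnd "Techniques" 3 (by decide) (by decide),
    pv_piece sections hnd "Worlds" 4 (by decide) (by decide),
    pv_piece sections hnd "Sources" 5 (by decide) (by decide),
    pv_last sections]
  simp [String.append_assoc]
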